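-- pv_equiv track=rewrite | github.com/xndong/w3resourcePythonExercise | String/String-exercise12.py | string_preprocess_3
-- ===== SOURCE A (Python) =====
-- import string
--
-- def string_preprocess_3(astring):
--     hard_match=string.punctuation
--     result_tmp=""
--     for character in astring:
--         if character in hard_match and character!='(':
--             pass
--         elif character in hard_match and character=='(':
--             result_tmp+=' '
--         else:
--             result_tmp+=character
--     return result_tmp
-- ===== SOURCE B (Python) =====
-- import string
--
-- def string_preprocess_3(astring):
--     # Staged passes over the punctuation alphabet: each pass erases one
--     # punctuation character from the whole string ('(' becomes a space).
--     for p in string.punctuation: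
--         astring = astring.replace(p, ' ' if p == '(' else '')
--     return astring
-- ===== Notes on version B (the rewrite author's own statement) =====
-- stated objective: faster
-- what changed: Instead of A's single Python-level scan over the input characters with membership tests and a growing accumulator, B loops over the 32-character punctuation alphabet and performs one whole-string str.replace pass per punctuation character (erasing it, or replacing '(' by a space); the per-input-character Python branch and accumulator disappear.
import Mathlib
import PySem

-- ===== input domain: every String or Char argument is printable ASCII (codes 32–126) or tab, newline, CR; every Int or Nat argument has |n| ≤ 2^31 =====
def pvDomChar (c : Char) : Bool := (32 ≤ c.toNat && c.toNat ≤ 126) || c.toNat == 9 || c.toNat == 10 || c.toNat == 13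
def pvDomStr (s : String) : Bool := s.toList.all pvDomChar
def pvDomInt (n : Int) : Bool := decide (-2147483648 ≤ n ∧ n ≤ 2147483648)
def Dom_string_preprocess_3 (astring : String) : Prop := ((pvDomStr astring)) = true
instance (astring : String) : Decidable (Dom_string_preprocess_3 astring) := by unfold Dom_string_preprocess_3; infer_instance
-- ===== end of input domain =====

-- B traverses the punctuation alphabet, one whole-string replace pass per punctuation
-- character, instead of A's single per-character scan with membership tests (alternative).


-- ===== PORT A =====
-- string.punctuation, as a list of characters (exact)
def pvPunct : List Char := "!\"#$%&'()*+,-./:;<=>?@[\\]^_`{|}~".toList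

-- literal port of A: loop over the input's characters, membership tests, string accumulator
def string_preprocess_3 (astring : String) : String :=
  astring.toList.foldl
    (fun result_tmp character =>
      if pvPunct.contains character ∧ character ≠ '(' then result_tmp
      else if pvPunct.contains character ∧ character = '(' then result_tmp ++ " "
      else result_tmp ++ String.ofList [character])
    ""

-- ===== PORT B =====
-- port of B: fold over the punctuation alphabet, one replace pass per punctuation char
def string_preprocess_3_alt (astring : String) : String :=
  pvPunct.foldl
    (fun s p => PySem.Str.replace s (String.ofList [p]) (if p = '(' then " " else ""))
    astring

-- ===== PRECONDITION & SPEC =====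
def Spec_string_preprocess_3 (astring : String) (out : String) : Prop := out = string_preprocess_3_alt astring
instance (astring : String) (out : String) : Decidable (Spec_string_preprocess_3 astring out) := by unfold Spec_string_preprocess_3; infer_instance

-- ===== CLAIM (what is proved, stated in full; the proofs are below) =====
def Claim_equal_string_preprocess_3 : Prop := ∀ (astring : String), Dom_string_preprocess_3 astring → Spec_string_preprocess_3 astring (string_preprocess_3 astring)

-- ===== LEMMAS AND PROOFS =====

-- the effect of one single-character replace pass, per character
def pvStep (p c : Char) : List Char := if c = p then (if p = '(' then [' '] else []) else [c]

-- the combined effect of processing the alphabet prefix ps, per character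
def pvTbl (ps : List Char) (c : Char) : Option Char :=
  if c ∈ ps then (if c = '(' then some ' ' else none) else some c

-- single-character replace at the List level is a flatMap
theorem pv_go_single (p : Char) (new : List Char) :
    ∀ (fuel : Nat) (l acc : List Char), l.length ≤ fuel →
      PySem.Chars.replace.go [p] new fuel l acc
        = acc.reverse ++ l.flatMap (fun c => if c = p then new else [c]) := by
  intro fuel
  induction fuel with
  | zero =>
    intro l acc h
    have : l = [] := List.length_eq_zero_iff.mp (Nat.le_zero.mp h)
    subst this
    simp [PySem.Chars.replace.go]
  | succ n ih =>
    intro l acc h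
    cases l with
    | nil => simp [PySem.Chars.replace.go]
    | cons c t =>
      have h' : t.length ≤ n := by simpa using Nat.le_of_succ_le_succ h
      by_cases hc : c = p
      · subst hc
        have hpre : List.isPrefixOf [c] (c :: t) = true := by
          simp [List.isPrefixOf]
        rw [PySem.Chars.replace.go]
        simp [hpre, ih t (new.reverse ++ acc) h']
      · have hpre : List.isPrefixOf [p] (c :: t) = false := by
          simp [List.isPrefixOf]
          exact fun hh => hc hh.symm
        rw [PySem.Chars.replace.go]
        simp [hpre, ih t (c :: acc) h', hc]

theorem pv_replace_single (p : Char) (new l : List Char) :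
    PySem.Chars.replace l [p] new = l.flatMap (fun c => if c = p then new else [c]) := by
  unfold PySem.Chars.replace
  simp only [List.isEmpty_cons, if_neg Bool.false_ne_true]
  rw [pv_go_single p new l.length l [] (le_refl _)]
  simp

-- one pass followed by the remaining passes = the combined table, provided ' ' survives the rest
theorem pv_pass_tbl (p : Char) (ps : List Char) (hsp : ' ' ∉ ps) (l : List Char) :
    (l.flatMap (pvStep p)).filterMap (pvTbl ps) = l.filterMap (pvTbl (p :: ps)) := by
  have key : ∀ c, (pvStep p c).filterMap (pvTbl ps) = (pvTbl (p :: ps) c).toList := by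
    intro c
    by_cases hc : c = p
    · subst hc
      by_cases hp : c = '(' <;> simp [pvStep, pvTbl, hsp, hp]
    · by_cases hq : c = '('
      · subst hq
        by_cases hm : '(' ∈ ps <;> simp [pvStep, pvTbl, hc, hm]
      · by_cases hm : c ∈ ps <;> simp [pvStep, pvTbl, hc, hq, hm]
  induction l with
  | nil => simp
  | cons c t ih =>
    rw [List.flatMap_cons, List.filterMap_append, ih, List.filterMap_cons, key c]
    cases h : pvTbl (p :: ps) c <;> simp

-- the B-side fold over the alphabet, at the List level
theorem pv_alt_loop (ps : List Char) (hsp : ' ' ∉ ps) (l : List Char) :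
    ps.foldl (fun s p => s.flatMap (pvStep p)) l = l.filterMap (pvTbl ps) := by
  induction ps generalizing l with
  | nil => simp [pvTbl]
  | cons p ps ih =>
    rw [List.foldl_cons, ih (fun h => hsp (List.mem_cons_of_mem _ h)),
        pv_pass_tbl p ps (fun h => hsp (List.mem_cons_of_mem _ h))]

-- the String-level fold of B equals the List-level fold
theorem pv_alt_str (ps : List Char) (l : List Char) :
    ps.foldl (fun s p => PySem.Str.replace s (String.ofList [p]) (if p = '(' then " " else ""))
      (String.ofList l)
      = String.ofList (ps.foldl (fun s p => s.flatMap (pvStep p)) l) := by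
  induction ps generalizing l with
  | nil => rfl
  | cons p ps ih =>
    rw [List.foldl_cons, List.foldl_cons]
    have hone : PySem.Str.replace (String.ofList l) (String.ofList [p]) (if p = '(' then " " else "")
        = String.ofList (l.flatMap (pvStep p)) := by
      unfold PySem.Str.replace
      rw [show (pvStep p) = (fun c => if c = p then (if p = '(' then [' '] else []) else [c]) from rfl]
      by_cases hp' : p = '(' <;> simp [hp', pv_replace_single]
    rw [hone, ih]

-- A's per-character step, rewritten through the combined table
theorem pv_step_a (acc : String) (c : Char) :
    (if pvPunct.contains c ∧ c ≠ '(' then acc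
     else if pvPunct.contains c ∧ c = '(' then acc ++ " "
     else acc ++ String.ofList [c]) = acc ++ String.ofList (pvTbl pvPunct c).toList := by
  unfold pvTbl
  by_cases hp : c = '('
  · subst hp
    have hm : '(' ∈ pvPunct := by decide
    simp [hm]
  · by_cases hm : c ∈ pvPunct
    · simp [hp, hm]
    · simp [hp, hm]

-- A's loop computes the filterMap of the combined table
theorem pv_loop_a (l : List Char) (acc : String) :
    l.foldl
      (fun result_tmp character =>
        if pvPunct.contains character ∧ character ≠ '(' then result_tmp
        else if pvPunct.contains character ∧ character = '(' then result_tmp ++ " "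
        else result_tmp ++ String.ofList [character])
      acc = acc ++ String.ofList (l.filterMap (pvTbl pvPunct)) := by
  induction l generalizing acc with
  | nil => simp
  | cons c t ih =>
    rw [List.foldl_cons, pv_step_a, ih, List.filterMap_cons]
    cases h : pvTbl pvPunct c <;>
      simp [String.append_assoc, ← String.ofList_append]

-- ===== VERDICT (by name: the statement is the Claim_ definition above) =====
theorem string_preprocess_3_spec : Claim_equal_string_preprocess_3 := by
  intro astring _
  unfold Spec_string_preprocess_3 string_preprocess_3 string_preprocess_3_alt
  rw [pv_loop_a]
  have h := pv_alt_str pvPunct astring.toList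
  rw [String.ofList_toList] at h
  rw [h, pv_alt_loop pvPunct (by decide)]
  simp
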